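-- pv_equiv track=rewrite | github.com/toheed-techlogix/R-TIE | src/parsing/parser.py | _build_comment_map
-- ===== SOURCE A (Python) =====
-- def _build_comment_map(lines: list[str]) -> list[bool]:
--     """Build a per-line boolean list: True if the line is inside a block comment.
--
--     A line is flagged True only when it sits *inside* a multi-line ``/* */``
--     region — i.e. the line that opens the region (and every line until the
--     closer) is True. Lines that contain only inline self-closing block
--     comments (e.g. ``MERGE /*+ PARALLEL(4) */ INTO …``) are False, because
--     ``clean_source_lines`` strips the comment text and the rest of the line
--     is real code. Multiple inline comments on one line are also handled —
--     we walk the line and only enter "in_comment" mode when an opener has no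
--     matching closer to its right.
--
--     Oracle does not support nested block comments, so the walk is at a
--     single nesting level.
--     """
--     in_comment = False
--     comment_map: list[bool] = []
--     for line in lines:
--         if in_comment:
--             comment_map.append(True)
--             # Look for the closer; if found, we leave comment mode but the
--             # current line still counts as inside the multi-line region.
--             if "*/" in line:
--                 in_comment = False
--             continue
--
--         # Walk the line consuming any number of fully-closed inline /* */
--         # comments. If we encounter an opener with no matching closer to
--         # its right, we've started a multi-line region — flag this line
--         # and switch to in_comment mode.
--         i = 0
--         starts_multiline_block = False
--         while True:
--             open_pos = line.find("/*", i)
--             if open_pos == -1: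
--                 break
--             close_pos = line.find("*/", open_pos + 2)
--             if close_pos == -1:
--                 # Opener without closer on this line — multi-line block opens
--                 starts_multiline_block = True
--                 break
--             i = close_pos + 2
--
--         if starts_multiline_block:
--             in_comment = True
--             comment_map.append(True)
--         else:
--             comment_map.append(False)
--     return comment_map
-- ===== SOURCE B (Python) =====
-- def _build_comment_map(lines: list[str]) -> list[bool]:
--     """Per-line map-then-fold: classify each line with a character-level
--     automaton, then combine the per-line summaries with one linear pass."""
--
--     def ends_in_comment(line: str) -> bool:
--         # Character automaton at a single nesting level: consume '/*' to
--         # enter comment state and '*/' to leave it; report the final state.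
--         in_c = False
--         k = 0
--         n = len(line)
--         while k < n:
--             if not in_c and line[k] == '/' and k + 1 < n and line[k + 1] == '*':
--                 in_c = True
--                 k += 2
--             elif in_c and line[k] == '*' and k + 1 < n and line[k + 1] == '/':
--                 in_c = False
--                 k += 2
--             else:
--                 k += 1
--         return in_c
--
--     opens = [ends_in_comment(line) for line in lines]
--     closes = ["*/" in line for line in lines]
--
--     result: list[bool] = []
--     in_comment = False
--     for o, c in zip(opens, closes):
--         if in_comment:
--             result.append(True)
--             if c:
--                 in_comment = False
--         else:
--             result.append(o)
--             if o:
--                 in_comment = True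
--     return result
-- ===== Notes on version B (the rewrite author's own statement) =====
-- stated objective: alternative
-- what changed: A walks each line with repeated str.find('/*')/str.find('*/') calls inside one stateful loop over lines; B first maps every line independently to a two-flag summary (ends-in-comment via a character-level automaton, and contains-a-closer), then combines the summaries in a separate linear fold.
import Mathlib
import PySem

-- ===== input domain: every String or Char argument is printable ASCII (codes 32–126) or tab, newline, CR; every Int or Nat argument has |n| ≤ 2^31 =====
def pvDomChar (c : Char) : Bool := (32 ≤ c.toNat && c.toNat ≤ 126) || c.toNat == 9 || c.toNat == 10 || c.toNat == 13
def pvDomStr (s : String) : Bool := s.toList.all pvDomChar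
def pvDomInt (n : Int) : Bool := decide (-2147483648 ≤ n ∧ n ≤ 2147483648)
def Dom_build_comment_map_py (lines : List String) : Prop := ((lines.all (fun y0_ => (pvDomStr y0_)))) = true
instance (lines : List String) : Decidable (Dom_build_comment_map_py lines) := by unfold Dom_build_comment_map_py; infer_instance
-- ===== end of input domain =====

-- B replaces A's repeated substring-find walk by a per-line character automaton
-- (a map) followed by one combining pass over the per-line summaries (a fold);
-- objective: alternative (same linear cost, different decomposition).


-- ===== PORT A =====
-- termination fact for A's walk: a find whose start lies past the end returns -1
theorem pv_findFrom_big (s sub : List Char) (k : Nat) (h : s.length < k) :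
    PySem.Chars.findFrom s sub (k : Int) none = -1 := by
  simp [PySem.Chars.findFrom]
  omega

-- A's inner `while True` walk from position i: repeatedly find "/*" from i, then
-- "*/" after it; returns `starts_multiline_block` (an opener with no closer found).
def pvWalkA (cs : List Char) (i : Nat) : Bool :=
  if h1 : PySem.Chars.findFrom cs ['/', '*'] (i : Int) = -1 then false
  else
    if h2 : PySem.Chars.findFrom cs ['*', '/'] (PySem.Chars.findFrom cs ['/', '*'] (i : Int) + 2) = -1 then
      true
    else
      pvWalkA cs ((PySem.Chars.findFrom cs ['*', '/'] (PySem.Chars.findFrom cs ['/', '*'] (i : Int) + 2)).toNat + 2)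
termination_by cs.length + 2 - i
decreasing_by
  by_cases hi : i ≤ cs.length
  · obtain ⟨hio, hpre, -⟩ := PySem.Chars.findFrom_natCast_spec cs ['/', '*'] i hi h1
    set o := PySem.Chars.findFrom cs ['/', '*'] (i : Int) with ho
    have ho0 : 0 ≤ o := le_trans (by exact_mod_cast Int.natCast_nonneg i) hio
    have hlen : o.toNat + 2 ≤ cs.length := by
      have := hpre.length_le
      simp [List.length_drop] at this
      omega
    have hcast : o + 2 = ((o.toNat + 2 : Nat) : Int) := by omega
    rw [hcast] at h2
    obtain ⟨hoc, -, -⟩ := PySem.Chars.findFrom_natCast_spec cs ['*', '/'] (o.toNat + 2) hlen h2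
    rw [hcast]
    omega
  · exact absurd (pv_findFrom_big cs ['/', '*'] i (by omega)) h1

def build_comment_map_py (lines : List String) : List Bool :=
  (lines.foldl
    (fun (st : Bool × List Bool) line =>
      if st.1 then
        (if PySem.Str.isIn "*/" line then false else true, st.2 ++ [true])
      else
        if pvWalkA line.toList 0 then (true, st.2 ++ [true])
        else (false, st.2 ++ [false]))
    (false, [])).2

-- ===== PORT B =====
-- B's character automaton `ends_in_comment` (st = currently inside a comment;
-- a matched "/*" / "*/" token consumes two characters, anything else one).
def pvScan (st : Bool) (cs : List Char) : Bool :=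
  match cs with
  | [] => st
  | [_] => st
  | a :: b :: rest2 =>
    if !st && (a = '/') && (b = '*') then pvScan true rest2
    else if st && (a = '*') && (b = '/') then pvScan false rest2
    else pvScan st (b :: rest2)

def build_comment_map_py_alt (lines : List String) : List Bool :=
  let opens := lines.map (fun line => pvScan false line.toList)
  let closes := lines.map (fun line => PySem.Str.isIn "*/" line)
  ((opens.zip closes).foldl
    (fun (st : Bool × List Bool) oc =>
      if st.1 then
        (if oc.2 then false else true, st.2 ++ [true])
      else
        (oc.1, st.2 ++ [if oc.1 then true else false]))
    (false, [])).2

-- ===== PRECONDITION & SPEC =====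
def Spec_build_comment_map_py (lines : List String) (out : List Bool) : Prop := out = build_comment_map_py_alt lines
instance (lines : List String) (out : List Bool) : Decidable (Spec_build_comment_map_py lines out) := by unfold Spec_build_comment_map_py; infer_instance

-- ===== CLAIM (what is proved, stated in full; the proofs are below) =====
def Claim_equal_build_comment_map_py : Prop := ∀ (lines : List String), Dom_build_comment_map_py lines → Spec_build_comment_map_py lines (build_comment_map_py lines)

-- ===== LEMMAS AND PROOFS =====

-- token steps of the automaton
theorem pvScan_open (r : List Char) : pvScan false ('/' :: '*' :: r) = pvScan true r := by
  simp [pvScan]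

theorem pvScan_close (r : List Char) : pvScan true ('*' :: '/' :: r) = pvScan false r := by
  simp [pvScan]

-- a cons that does not start the relevant token just advances the automaton
theorem pvScan_cons_code {a : Char} {rest : List Char}
    (h : ¬ ['/', '*'] <+: a :: rest) : pvScan false (a :: rest) = pvScan false rest := by
  cases rest with
  | nil => rfl
  | cons b r =>
    rw [pvScan]
    rw [if_neg, if_neg]
    · simp
    · simp
      intro ha hb
      exact absurd (by simp [ha, hb]) h

theorem pvScan_cons_in {a : Char} {rest : List Char}
    (h : ¬ ['*', '/'] <+: a :: rest) : pvScan true (a :: rest) = pvScan true rest := by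
  cases rest with
  | nil => rfl
  | cons b r =>
    rw [pvScan]
    rw [if_neg, if_neg]
    · simp
      intro ha hb
      exact absurd (by simp [ha, hb]) h
    · simp

theorem pvScan_code_no_open {l : List Char} (h : ¬ ['/', '*'] <:+: l) :
    pvScan false l = false := by
  induction l with
  | nil => rfl
  | cons a rest ih =>
    rw [pvScan_cons_code (fun hp => h hp.isInfix)]
    exact ih (fun hi => h (hi.trans (List.suffix_cons a rest).isInfix))

theorem pvScan_in_no_close {l : List Char} (h : ¬ ['*', '/'] <:+: l) :
    pvScan true l = true := by
  induction l with
  | nil => rfl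
  | cons a rest ih =>
    rw [pvScan_cons_in (fun hp => h hp.isInfix)]
    exact ih (fun hi => h (hi.trans (List.suffix_cons a rest).isInfix))

-- skipping a token-free stretch does not change the automaton's state
theorem pvScan_code_skip (l : List Char) (j : Nat)
    (h : ∀ m, m < j → ¬ ['/', '*'] <+: l.drop m) :
    pvScan false l = pvScan false (l.drop j) := by
  induction j generalizing l with
  | zero => rfl
  | succ j ih =>
    cases l with
    | nil => simp
    | cons a rest =>
      rw [pvScan_cons_code (h 0 (by omega))]
      rw [ih rest (fun m hm => by simpa using h (m + 1) (by omega))]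
      rfl

theorem pvScan_in_skip (l : List Char) (j : Nat)
    (h : ∀ m, m < j → ¬ ['*', '/'] <+: l.drop m) :
    pvScan true l = pvScan true (l.drop j) := by
  induction j generalizing l with
  | zero => rfl
  | succ j ih =>
    cases l with
    | nil => simp
    | cons a rest =>
      rw [pvScan_cons_in (h 0 (by omega))]
      rw [ih rest (fun m hm => by simpa using h (m + 1) (by omega))]
      rfl

-- a prefix occurrence of a two-char token splits the suffix
theorem pv_drop_token {cs : List Char} {p : Nat} {x y : Char}
    (h : [x, y] <+: cs.drop p) : cs.drop p = x :: y :: cs.drop (p + 2) := by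
  obtain ⟨t, ht⟩ := h
  have h2 : cs.drop (p + 2) = (cs.drop p).drop 2 := by
    rw [List.drop_drop]
  rw [h2, ← ht]
  simp

-- the core per-line fact: A's find-walk from i equals B's automaton on the suffix
theorem pvWalkA_eq_scan : ∀ (cs : List Char) (i : Nat), i ≤ cs.length →
    pvWalkA cs i = pvScan false (cs.drop i) := by
  intro cs i
  induction i using pvWalkA.induct (cs := cs) with
  | case1 i h1 =>
    intro hi
    rw [pvWalkA, dif_pos h1]
    have := (PySem.Chars.findFrom_natCast_eq_neg_one_iff cs ['/', '*'] i hi).mp h1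
    exact (pvScan_code_no_open this).symm
  | case2 i h1 h2 =>
    intro hi
    rw [pvWalkA, dif_neg h1, dif_pos h2]
    obtain ⟨hio, hpre, hmin⟩ := PySem.Chars.findFrom_natCast_spec cs ['/', '*'] i hi h1
    set o := PySem.Chars.findFrom cs ['/', '*'] (i : Int) with ho
    have ho0 : 0 ≤ o := le_trans (by exact_mod_cast Int.natCast_nonneg i) hio
    have hlen : o.toNat + 2 ≤ cs.length := by
      have := hpre.length_le
      simp [List.length_drop] at this
      omega
    have hcast : o + 2 = ((o.toNat + 2 : Nat) : Int) := by omega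
    rw [hcast] at h2
    have hnoc := (PySem.Chars.findFrom_natCast_eq_neg_one_iff cs ['*', '/'] (o.toNat + 2) hlen).mp h2
    have hskip : pvScan false (cs.drop i) = pvScan false (cs.drop o.toNat) := by
      have := pvScan_code_skip (cs.drop i) (o.toNat - i)
        (fun m hm => by
          rw [List.drop_drop]
          exact hmin (i + m) (by omega) (by omega))
      rwa [List.drop_drop, Nat.add_sub_cancel' (by omega)] at this
    rw [hskip, pv_drop_token hpre, pvScan_open, pvScan_in_no_close hnoc]
  | case3 i h1 h2 ih =>
    intro hi
    rw [pvWalkA, dif_neg h1, dif_neg h2]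
    obtain ⟨hio, hpre, hmin⟩ := PySem.Chars.findFrom_natCast_spec cs ['/', '*'] i hi h1
    set o := PySem.Chars.findFrom cs ['/', '*'] (i : Int) with ho
    have ho0 : 0 ≤ o := le_trans (by exact_mod_cast Int.natCast_nonneg i) hio
    have hlen : o.toNat + 2 ≤ cs.length := by
      have := hpre.length_le
      simp [List.length_drop] at this
      omega
    have hcast : o + 2 = ((o.toNat + 2 : Nat) : Int) := by omega
    rw [hcast] at h2 ih ⊢
    obtain ⟨hoc, hpre2, hmin2⟩ := PySem.Chars.findFrom_natCast_spec cs ['*', '/'] (o.toNat + 2) hlen h2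
    set c := PySem.Chars.findFrom cs ['*', '/'] ((o.toNat + 2 : Nat) : Int) with hc
    have hc0 : 0 ≤ c := le_trans (by positivity) hoc
    have hclen : c.toNat + 2 ≤ cs.length := by
      have := hpre2.length_le
      simp [List.length_drop] at this
      omega
    have hskip : pvScan false (cs.drop i) = pvScan false (cs.drop o.toNat) := by
      have := pvScan_code_skip (cs.drop i) (o.toNat - i)
        (fun m hm => by
          rw [List.drop_drop]
          exact hmin (i + m) (by omega) (by omega))
      rwa [List.drop_drop, Nat.add_sub_cancel' (by omega)] at this
    have hskip2 : pvScan true (cs.drop (o.toNat + 2)) = pvScan true (cs.drop c.toNat) := by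
      have := pvScan_in_skip (cs.drop (o.toNat + 2)) (c.toNat - (o.toNat + 2))
        (fun m hm => by
          rw [List.drop_drop]
          exact hmin2 (o.toNat + 2 + m) (by omega) (by omega))
      rwa [List.drop_drop, Nat.add_sub_cancel' (by omega)] at this
    rw [hskip, pv_drop_token hpre, pvScan_open, hskip2, pv_drop_token hpre2, pvScan_close]
    exact ih hclen

-- the outer pass: A's single fold equals B's fold over the zipped per-line summaries
theorem pv_fold_eq (lines : List String) (b : Bool) (acc : List Bool) :
    lines.foldl
      (fun (st : Bool × List Bool) line =>
        if st.1 then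
          (if PySem.Str.isIn "*/" line then false else true, st.2 ++ [true])
        else
          if pvWalkA line.toList 0 then (true, st.2 ++ [true])
          else (false, st.2 ++ [false]))
      (b, acc)
    = ((lines.map (fun line => pvScan false line.toList)).zip
        (lines.map (fun line => PySem.Str.isIn "*/" line))).foldl
      (fun (st : Bool × List Bool) oc =>
        if st.1 then
          (if oc.2 then false else true, st.2 ++ [true])
        else
          (oc.1, st.2 ++ [if oc.1 then true else false]))
      (b, acc) := by
  induction lines generalizing b acc with
  | nil => rfl
  | cons line rest ih =>
    simp only [List.map_cons, List.zip_cons_cons, List.foldl_cons]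
    have hline : pvScan false line.toList = pvWalkA line.toList 0 :=
      (pvWalkA_eq_scan line.toList 0 (by omega)).symm
    cases b with
    | true => exact ih _ _
    | false =>
      rw [hline]
      cases hwa : pvWalkA line.toList 0
      · simp only [Bool.false_eq_true, if_false]
        exact ih _ _
      · simp only [if_true]
        exact ih _ _

-- ===== VERDICT (by name: the statement is the Claim_ definition above) =====
theorem build_comment_map_py_spec : Claim_equal_build_comment_map_py := by
  intro lines _
  unfold Spec_build_comment_map_py build_comment_map_py build_comment_map_py_alt
  rw [pv_fold_eq]
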